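-- pv_equiv track=rewrite | github.com/MANISHANKPULLURI/Glove-Model | genremapping.py | cleanup_genre_name
-- ===== SOURCE A (Python) =====
-- def cleanup_genre_name(genre):
--     suffixes = [
--         ' film', ' movie', ' picture', '[not in citation given]', ' production',
--         ' drama', ' comedy', ' action', ' thriller', ' horror', ' romance',
--         ' musical', ' western', ' fantasy', ' adventure', ' documentary',
--         ' animation', ' biography', ' war', ' crime', ' mystery', ' experimental',
--         ' short', ' family'
--     ]
--     if 'biographical' in genre:
--         return 'biography'
--     if 'martial art' in genre or 'kung fu' in genre:
--         return 'action'
--     if 'sci-fi' in genre or 'science fiction' in genre: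
--         return 'science fiction'
--     if 'world war' in genre or 'wwii' in genre or 'ww1' in genre:
--         return 'war'
--     if 'romantic comedy' in genre or 'rom com' in genre or 'romcom' in genre:
--         return 'comedy'
--     if 'documentary' in genre or 'docudrama' in genre:
--         return 'documentary'
--     if any(x in genre for x in ['yakuza', 'gangster', 'mob', 'crime']):
--         return 'crime'
--     if 'historical' in genre or 'period' in genre:
--         return 'historical'
--     if 'experimental' in genre or 'avant garde' in genre or 'art' in genre:
--         return 'experimental'
--     if 'animation' in genre or 'animated' in genre or 'anime' in genre:
--         return 'animation'
--     if 'family' in genre or 'children' in genre: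
--         return 'family'
--     if 'teen' in genre or 'youth' in genre or 'coming of age' in genre:
--         return 'youth'
--     if 'social' in genre or 'political' in genre:
--         return 'social'
--     if 'short' in genre:
--         return 'short film'
--     if 'sport' in genre or 'boxing' in genre or 'wrestling' in genre:
--         return 'sports'
--     for suffix in suffixes:
--         if genre.endswith(suffix):
--             genre = genre[:-len(suffix)]
--     genre = genre.strip().lower()
--     genre = genre.replace('/', ' ').replace('-', ' ').replace('_', ' ')
--     genre = ' '.join(genre.split())
--     return genre
-- ===== SOURCE B (Python) =====
-- # B: priority-dict classification with a running-minimum scan (no early-return chain),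
-- # removesuffix-based stripping, and a single character-level pass that lowercases,
-- # treats '/', '-', '_' as separators and collects words in one sweep.
--
-- _KEYWORDS = {
--     'biographical': (0, 'biography'),
--     'martial art': (1, 'action'), 'kung fu': (1, 'action'),
--     'sci-fi': (2, 'science fiction'), 'science fiction': (2, 'science fiction'),
--     'world war': (3, 'war'), 'wwii': (3, 'war'), 'ww1': (3, 'war'),
--     'romantic comedy': (4, 'comedy'), 'rom com': (4, 'comedy'), 'romcom': (4, 'comedy'),
--     'documentary': (5, 'documentary'), 'docudrama': (5, 'documentary'),
--     'yakuza': (6, 'crime'), 'gangster': (6, 'crime'), 'mob': (6, 'crime'), 'crime': (6, 'crime'),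
--     'historical': (7, 'historical'), 'period': (7, 'historical'),
--     'experimental': (8, 'experimental'), 'avant garde': (8, 'experimental'), 'art': (8, 'experimental'),
--     'animation': (9, 'animation'), 'animated': (9, 'animation'), 'anime': (9, 'animation'),
--     'family': (10, 'family'), 'children': (10, 'family'),
--     'teen': (11, 'youth'), 'youth': (11, 'youth'), 'coming of age': (11, 'youth'),
--     'social': (12, 'social'), 'political': (12, 'social'),
--     'short': (13, 'short film'),
--     'sport': (14, 'sports'), 'boxing': (14, 'sports'), 'wrestling': (14, 'sports'),
-- }
--
-- _SUFFIXES = [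
--     ' film', ' movie', ' picture', '[not in citation given]', ' production',
--     ' drama', ' comedy', ' action', ' thriller', ' horror', ' romance',
--     ' musical', ' western', ' fantasy', ' adventure', ' documentary',
--     ' animation', ' biography', ' war', ' crime', ' mystery', ' experimental',
--     ' short', ' family'
-- ]
--
--
-- def cleanup_genre_name(genre):
--     # scan every keyword, keep the match of smallest priority
--     best = None
--     for kw, pr in _KEYWORDS.items():
--         if kw in genre and (best is None or pr[0] < best[0]):
--             best = pr
--     if best is not None:
--         return best[1]
--     for sfx in _SUFFIXES:
--         genre = genre.removesuffix(sfx)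
--     # one pass: lowercase, split on whitespace and '/', '-', '_'
--     words, cur = [], []
--     for ch in genre:
--         if ch.isspace() or ch in '/-_':
--             if cur:
--                 words.append(''.join(cur))
--                 cur = []
--         else:
--             cur.append(ch.lower())
--     if cur:
--         words.append(''.join(cur))
--     return ' '.join(words)
-- ===== Notes on version B (the rewrite author's own statement) =====
-- stated objective: alternative
-- what changed: The early-return if/or chain becomes a running-minimum scan over a keyword->(priority,result) dict (every keyword is tested, the smallest-priority hit wins), suffix stripping uses str.removesuffix, and the strip/lower/replace/split/join tail is fused into a single character-level pass that lowercases, treats slash, hyphen and underscore as word separators and collects words in one sweep.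
import Mathlib
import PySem

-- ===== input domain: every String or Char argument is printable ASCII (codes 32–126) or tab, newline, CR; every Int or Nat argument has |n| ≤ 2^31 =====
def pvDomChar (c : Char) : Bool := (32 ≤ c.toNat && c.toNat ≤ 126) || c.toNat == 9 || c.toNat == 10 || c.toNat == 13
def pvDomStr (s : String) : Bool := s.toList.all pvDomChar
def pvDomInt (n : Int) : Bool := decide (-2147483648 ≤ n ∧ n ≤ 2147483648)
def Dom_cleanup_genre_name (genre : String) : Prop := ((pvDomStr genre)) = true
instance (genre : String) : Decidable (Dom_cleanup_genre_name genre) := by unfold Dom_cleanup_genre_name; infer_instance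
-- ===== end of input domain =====

-- B replaces A's early-return if/or chain by a running-minimum scan over a priority dict,
-- uses removesuffix-style stripping, and fuses strip/lower/replace/split into one character pass (alternative, same cost).

-- ===== PORT A =====
def pvSuffixes : List String :=
  [" film", " movie", " picture", "[not in citation given]", " production",
   " drama", " comedy", " action", " thriller", " horror", " romance",
   " musical", " western", " fantasy", " adventure", " documentary",
   " animation", " biography", " war", " crime", " mystery", " experimental",
   " short", " family"]

-- A's trailing normalisation: suffix-strip loop, then strip/lower/replace/join(split)
def pvTailA (genre : String) : String :=
  let genre := pvSuffixes.foldl (fun g suffix =>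
    if PySem.Str.endswith g suffix then PySem.Str.slice g none (some (-(PySem.Str.len suffix))) else g) genre
  let genre := PySem.Str.lower (PySem.Str.strip genre)
  let genre := PySem.Str.replace (PySem.Str.replace (PySem.Str.replace genre "/" " ") "-" " ") "_" " "
  PySem.Str.join " " (PySem.Str.split₀ genre)

def cleanup_genre_name (genre : String) : String :=
  if PySem.Str.isIn "biographical" genre then "biography"
  else if PySem.Str.isIn "martial art" genre || PySem.Str.isIn "kung fu" genre then "action"
  else if PySem.Str.isIn "sci-fi" genre || PySem.Str.isIn "science fiction" genre then "science fiction"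
  else if PySem.Str.isIn "world war" genre || PySem.Str.isIn "wwii" genre || PySem.Str.isIn "ww1" genre then "war"
  else if PySem.Str.isIn "romantic comedy" genre || PySem.Str.isIn "rom com" genre || PySem.Str.isIn "romcom" genre then "comedy"
  else if PySem.Str.isIn "documentary" genre || PySem.Str.isIn "docudrama" genre then "documentary"
  else if ["yakuza", "gangster", "mob", "crime"].any (fun x => PySem.Str.isIn x genre) then "crime"
  else if PySem.Str.isIn "historical" genre || PySem.Str.isIn "period" genre then "historical"
  else if PySem.Str.isIn "experimental" genre || PySem.Str.isIn "avant garde" genre || PySem.Str.isIn "art" genre then "experimental"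
  else if PySem.Str.isIn "animation" genre || PySem.Str.isIn "animated" genre || PySem.Str.isIn "anime" genre then "animation"
  else if PySem.Str.isIn "family" genre || PySem.Str.isIn "children" genre then "family"
  else if PySem.Str.isIn "teen" genre || PySem.Str.isIn "youth" genre || PySem.Str.isIn "coming of age" genre then "youth"
  else if PySem.Str.isIn "social" genre || PySem.Str.isIn "political" genre then "social"
  else if PySem.Str.isIn "short" genre then "short film"
  else if PySem.Str.isIn "sport" genre || PySem.Str.isIn "boxing" genre || PySem.Str.isIn "wrestling" genre then "sports"
  else pvTailA genre

-- ===== PORT B =====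
-- the _KEYWORDS dict of Source B: keyword ↦ (priority, canonical result), in insertion order
def pvKeywords : List (String × Int × String) :=
  [("biographical", 0, "biography"),
   ("martial art", 1, "action"), ("kung fu", 1, "action"),
   ("sci-fi", 2, "science fiction"), ("science fiction", 2, "science fiction"),
   ("world war", 3, "war"), ("wwii", 3, "war"), ("ww1", 3, "war"),
   ("romantic comedy", 4, "comedy"), ("rom com", 4, "comedy"), ("romcom", 4, "comedy"),
   ("documentary", 5, "documentary"), ("docudrama", 5, "documentary"),
   ("yakuza", 6, "crime"), ("gangster", 6, "crime"), ("mob", 6, "crime"), ("crime", 6, "crime"),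
   ("historical", 7, "historical"), ("period", 7, "historical"),
   ("experimental", 8, "experimental"), ("avant garde", 8, "experimental"), ("art", 8, "experimental"),
   ("animation", 9, "animation"), ("animated", 9, "animation"), ("anime", 9, "animation"),
   ("family", 10, "family"), ("children", 10, "family"),
   ("teen", 11, "youth"), ("youth", 11, "youth"), ("coming of age", 11, "youth"),
   ("social", 12, "social"), ("political", 12, "social"),
   ("short", 13, "short film"),
   ("sport", 14, "sports"), ("boxing", 14, "sports"), ("wrestling", 14, "sports")]

-- body of Source B's loop: 'if kw in genre and (best is None or pr[0] < best[0]): best = pr'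
def pvBestStep (genre : String) (best : Option (Int × String)) (e : String × Int × String) :
    Option (Int × String) :=
  if PySem.Str.isIn e.1 genre &&
      (match best with | none => true | some b => decide (e.2.1 < b.1)) then some e.2 else best

-- port of str.removesuffix (exact: drops one trailing copy of sfx when present; no-op otherwise)
def pvRemoveSuffix (g sfx : String) : String :=
  if PySem.Str.endswith g sfx then String.ofList (g.toList.take (g.toList.length - sfx.toList.length)) else g

-- Source B's character pass; 'words' and 'cur' are kept reversed (Python appends at the back) and
-- reversed on exit, so 'words.append' / 'cur.append' are conses here
def pvWordsGo : List Char → List Char → List (List Char) → List (List Char)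
  | [], cur, words => if cur.isEmpty then words.reverse else (cur.reverse :: words).reverse
  | c :: rest, cur, words =>
      if PySem.Chars.isspace c || c == '/' || c == '-' || c == '_' then
        if cur.isEmpty then pvWordsGo rest [] words
        else pvWordsGo rest [] (cur.reverse :: words)
      else pvWordsGo rest (PySem.Chars.lowerChar c :: cur) words

-- Source B's tail: removesuffix loop, then the single character pass and ' '.join
def pvTailB (genre : String) : String :=
  let genre := pvSuffixes.foldl pvRemoveSuffix genre
  PySem.Str.join " " ((pvWordsGo genre.toList [] []).map String.ofList)

def cleanup_genre_name_alt (genre : String) : String :=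
  match pvKeywords.foldl (pvBestStep genre) none with
  | some b => b.2
  | none => pvTailB genre

-- ===== PRECONDITION & SPEC =====
def Spec_cleanup_genre_name (genre : String) (out : String) : Prop := out = cleanup_genre_name_alt genre
instance (genre : String) (out : String) : Decidable (Spec_cleanup_genre_name genre out) := by unfold Spec_cleanup_genre_name; infer_instance

-- ===== CLAIM (what is proved, stated in full; the proofs are below) =====
def Claim_equal_cleanup_genre_name : Prop := ∀ (genre : String), Dom_cleanup_genre_name genre → Spec_cleanup_genre_name genre (cleanup_genre_name genre)

-- ===== LEMMAS AND PROOFS =====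

-- ---- classification: the running-minimum fold equals the first match on a priority-sorted list ----

def pvFirst (genre : String) : List (String × Int × String) → Option (Int × String)
  | [] => none
  | e :: t => if PySem.Str.isIn e.1 genre then some e.2 else pvFirst genre t

theorem pv_fold_some (genre : String) (b : Int × String) (l : List (String × Int × String))
    (h : ∀ e ∈ l, b.1 ≤ e.2.1) : l.foldl (pvBestStep genre) (some b) = some b := by
  induction l with
  | nil => rfl
  | cons e t ih =>
      have hb : pvBestStep genre (some b) e = some b := by
        have := h e (List.mem_cons_self)
        simp [pvBestStep, not_lt.2 this]
      rw [List.foldl_cons, hb]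
      exact ih (fun e' he' => h e' (List.mem_cons_of_mem _ he'))

theorem pv_fold_first (genre : String) (l : List (String × Int × String))
    (h : l.Pairwise (fun a b => a.2.1 ≤ b.2.1)) :
    l.foldl (pvBestStep genre) none = pvFirst genre l := by
  induction l with
  | nil => rfl
  | cons e t ih =>
      rw [List.pairwise_cons] at h
      rw [List.foldl_cons]
      by_cases hi : PySem.Str.isIn e.1 genre = true
      · have hi' : PySem.Chars.isIn e.1.toList genre.toList = true := hi
        have hb : pvBestStep genre none e = some e.2 := by
          simp [pvBestStep, PySem.Str.isIn, hi']
        rw [hb, pv_fold_some genre e.2 t (fun e' he' => h.1 e' he'), pvFirst, if_pos hi]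
      · have hi' : ¬ PySem.Chars.isIn e.1.toList genre.toList = true := hi
        have hb : pvBestStep genre none e = none := by
          simp [pvBestStep, PySem.Str.isIn, hi']
        rw [hb, ih h.2, pvFirst, if_neg hi]

theorem pv_fold_keywords (genre : String) :
    pvKeywords.foldl (pvBestStep genre) none = pvFirst genre pvKeywords :=
  pv_fold_first genre pvKeywords (by decide)

theorem pv_match_ite (c : Bool) (r : Int × String) (o : Option (Int × String)) (d : String) :
    (match (if c then some r else o) with | some b => b.2 | none => d)
      = if c then r.2 else (match o with | some b => b.2 | none => d) := by
  cases c <;> rfl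

theorem pv_if_or {α : Type} (a b : Bool) (x y : α) :
    (if (a || b) then x else y) = if a then x else if b then x else y := by
  cases a <;> simp

-- ---- characters: the fused pass's branch tests against A's lower-then-replace pipeline ----

def pvSub (o n c : Char) : Char := if c = o then n else c
def pvF (c : Char) : Char := pvSub '_' ' ' (pvSub '-' ' ' (pvSub '/' ' ' (PySem.Chars.lowerChar c)))

theorem pv_char_le (a b : Char) : a ≤ b ↔ a.toNat ≤ b.toNat := by
  rw [Char.le_def, UInt32.le_iff_toNat_le]; rfl

theorem pv_upper_bounds (c : Char) (h : PySem.Chars.isupper c = true) :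
    65 ≤ c.toNat ∧ c.toNat ≤ 90 := by
  simp only [PySem.Chars.isupper, Bool.and_eq_true, decide_eq_true_eq, pv_char_le] at h
  exact h

theorem pv_toNat_lower (c : Char) (h : PySem.Chars.isupper c = true) :
    (PySem.Chars.lowerChar c).toNat = c.toNat + 32 := by
  have hb := pv_upper_bounds c h
  simp only [PySem.Chars.lowerChar, if_pos h]
  rw [Char.toNat_ofNat, if_pos (Or.inl (by omega))]

theorem pv_ne_of_toNat_ne {a b : Char} (h : a.toNat ≠ b.toNat) : a ≠ b :=
  fun he => h (by rw [he])

theorem pv_isspace_toNat (c : Char) (h : 33 ≤ c.toNat ∧ c.toNat ≤ 132) :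
    PySem.Chars.isspace c = false := by
  simp only [PySem.Chars.isspace]
  simp only [Bool.or_eq_false_iff, Bool.and_eq_false_iff, decide_eq_false_iff_not]
  omega

-- pvF of an uppercase letter is just its lowercase form; no whitespace/separator appears
theorem pv_F_upper (c : Char) (h : PySem.Chars.isupper c = true) :
    pvF c = PySem.Chars.lowerChar c := by
  have hl := pv_toNat_lower c h
  have hb := pv_upper_bounds c h
  have n1 : pvSub '/' ' ' (PySem.Chars.lowerChar c) = PySem.Chars.lowerChar c :=
    if_neg (pv_ne_of_toNat_ne (by rw [hl]; show c.toNat + 32 ≠ 47; omega))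
  have n2 : pvSub '-' ' ' (PySem.Chars.lowerChar c) = PySem.Chars.lowerChar c :=
    if_neg (pv_ne_of_toNat_ne (by rw [hl]; show c.toNat + 32 ≠ 45; omega))
  have n3 : pvSub '_' ' ' (PySem.Chars.lowerChar c) = PySem.Chars.lowerChar c :=
    if_neg (pv_ne_of_toNat_ne (by rw [hl]; show c.toNat + 32 ≠ 95; omega))
  unfold pvF
  rw [n1, n2, n3]

theorem pv_lower_eq_of_not_upper (c : Char) (h : ¬ PySem.Chars.isupper c = true) :
    PySem.Chars.lowerChar c = c := by
  simp [PySem.Chars.lowerChar, h]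

theorem pv_K2 (c : Char)
    (h : (PySem.Chars.isspace c || c == '/' || c == '-' || c == '_') = false) :
    pvF c = PySem.Chars.lowerChar c := by
  by_cases hu : PySem.Chars.isupper c = true
  · exact pv_F_upper c hu
  · simp only [Bool.or_eq_false_iff, beq_eq_false_iff_ne, ne_eq] at h
    rw [pv_lower_eq_of_not_upper c hu] at *
    unfold pvF pvSub
    rw [pv_lower_eq_of_not_upper c hu, if_neg h.1.1.2, if_neg h.1.2, if_neg h.2]

theorem pv_K1 (c : Char) :
    PySem.Chars.isspace (pvF c) = (PySem.Chars.isspace c || c == '/' || c == '-' || c == '_') := by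
  by_cases hu : PySem.Chars.isupper c = true
  · have hl := pv_toNat_lower c hu
    have hb := pv_upper_bounds c hu
    rw [pv_F_upper c hu]
    have e1 := pv_isspace_toNat (PySem.Chars.lowerChar c) (by omega)
    have e2 := pv_isspace_toNat c (by omega)
    have d1 : (c == '/') = false := by
      simp only [beq_eq_false_iff_ne, ne_eq]; exact pv_ne_of_toNat_ne (by rw [show ('/').toNat = 47 from rfl]; omega)
    have d2 : (c == '-') = false := by
      simp only [beq_eq_false_iff_ne, ne_eq]; exact pv_ne_of_toNat_ne (by rw [show ('-').toNat = 45 from rfl]; omega)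
    have d3 : (c == '_') = false := by
      simp only [beq_eq_false_iff_ne, ne_eq]; exact pv_ne_of_toNat_ne (by rw [show ('_').toNat = 95 from rfl]; omega)
    rw [e1, e2, d1, d2, d3]; rfl
  · have hl := pv_lower_eq_of_not_upper c hu
    by_cases h1 : c = '/'
    · subst h1; decide
    by_cases h2 : c = '-'
    · subst h2; decide
    by_cases h3 : c = '_'
    · subst h3; decide
    have hF : pvF c = c := by unfold pvF pvSub; rw [hl, if_neg h1, if_neg h2, if_neg h3]
    rw [hF]
    have d1 : (c == '/') = false := by simp [h1]
    have d2 : (c == '-') = false := by simp [h2]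
    have d3 : (c == '_') = false := by simp [h3]
    rw [d1, d2, d3]
    simp

-- ---- split₀ facts ----

theorem pv_go_nil (cur : List Char) (acc : List (List Char)) :
    PySem.Chars.split₀.go [] cur acc =
      if cur.isEmpty then acc.reverse else (cur.reverse :: acc).reverse := by
  rw [PySem.Chars.split₀.go.eq_def]

theorem pv_go_cons (c : Char) (rest cur : List Char) (acc : List (List Char)) :
    PySem.Chars.split₀.go (c :: rest) cur acc =
      if PySem.Chars.isspace c then
        if cur.isEmpty then PySem.Chars.split₀.go rest [] acc
        else PySem.Chars.split₀.go rest [] (cur.reverse :: acc)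
      else PySem.Chars.split₀.go rest (c :: cur) acc := by
  rw [PySem.Chars.split₀.go.eq_def]

theorem pv_go_space (ws : List Char) (hws : ws.all PySem.Chars.isspace)
    (cur : List Char) (acc : List (List Char)) :
    PySem.Chars.split₀.go ws cur acc = PySem.Chars.split₀.go [] cur acc := by
  induction ws generalizing cur acc with
  | nil => rfl
  | cons c rest ih =>
      rw [List.all_cons, Bool.and_eq_true] at hws
      rw [pv_go_cons, if_pos hws.1]
      by_cases hcur : cur.isEmpty
      · rw [if_pos hcur, ih hws.2, pv_go_nil, pv_go_nil, if_pos hcur]; rfl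
      · rw [if_neg hcur, ih hws.2, pv_go_nil, pv_go_nil, if_neg hcur]; rfl

theorem pv_go_append_space (ws : List Char) (hws : ws.all PySem.Chars.isspace)
    (t cur : List Char) (acc : List (List Char)) :
    PySem.Chars.split₀.go (t ++ ws) cur acc = PySem.Chars.split₀.go t cur acc := by
  induction t generalizing cur acc with
  | nil => simpa using pv_go_space ws hws cur acc
  | cons c r ih =>
      rw [List.cons_append, pv_go_cons, pv_go_cons]
      split_ifs <;> exact ih _ _

theorem pv_go_space_prefix (ws : List Char) (hws : ws.all PySem.Chars.isspace)
    (t : List Char) (acc : List (List Char)) :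
    PySem.Chars.split₀.go (ws ++ t) [] acc = PySem.Chars.split₀.go t [] acc := by
  induction ws with
  | nil => rfl
  | cons c rest ih =>
      rw [List.all_cons, Bool.and_eq_true] at hws
      rw [List.cons_append, pv_go_cons, if_pos hws.1, if_pos (by simp)]
      exact ih hws.2

-- the fused pass computes exactly split₀ of the mapped string
theorem pv_go_words (s : List Char) (cur : List Char) (acc : List (List Char)) :
    PySem.Chars.split₀.go (s.map pvF) cur acc = pvWordsGo s cur acc := by
  induction s generalizing cur acc with
  | nil => simp only [List.map_nil]; rw [pv_go_nil]; rfl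
  | cons c r ih =>
      simp only [List.map_cons]
      rw [pv_go_cons, pv_K1]
      show _ = if (PySem.Chars.isspace c || c == '/' || c == '-' || c == '_') then
          (if cur.isEmpty then pvWordsGo r [] acc else pvWordsGo r [] (cur.reverse :: acc))
        else pvWordsGo r (PySem.Chars.lowerChar c :: cur) acc
      by_cases hcond : (PySem.Chars.isspace c || c == '/' || c == '-' || c == '_') = true
      · rw [if_pos hcond, if_pos hcond]
        by_cases hcur : cur.isEmpty
        · rw [if_pos hcur, if_pos hcur, ih]
        · rw [if_neg hcur, if_neg hcur, ih]
      · rw [if_neg hcond, if_neg hcond, pv_K2 c (Bool.not_eq_true _ ▸ hcond), ih]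

-- ---- replace with a single-character pattern is a map ----

theorem pv_replace_go (o n : Char) (fuel : Nat) :
    ∀ (l acc : List Char), l.length ≤ fuel →
      PySem.Chars.replace.go [o] [n] fuel l acc = acc.reverse ++ l.map (pvSub o n) := by
  induction fuel with
  | zero =>
      intro l acc h
      have hl : l = [] := List.eq_nil_of_length_eq_zero (Nat.le_zero.mp h)
      subst hl
      rw [PySem.Chars.replace.go.eq_def]; simp
  | succ fuel ih =>
      intro l acc h
      cases l with
      | nil => rw [PySem.Chars.replace.go.eq_def]; simp
      | cons c t =>
          rw [PySem.Chars.replace.go.eq_def]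
          simp only [List.length_cons, Nat.add_le_add_iff_right] at h
          by_cases hc : c = o
          · have hp : [o].isPrefixOf (c :: t) = true := by simp [List.isPrefixOf, hc]
            simp only [hp, if_pos]
            rw [show List.drop [o].length (c :: t) = t from rfl, ih t _ h]
            simp [pvSub, hc]
          · have hp : [o].isPrefixOf (c :: t) = false := by
              simp only [List.isPrefixOf, Bool.and_eq_false_iff, beq_eq_false_iff_ne, ne_eq]
              exact Or.inl (fun h => hc h.symm)
            simp only [hp]
            rw [if_neg (by simp), ih t _ h]
            simp [pvSub, hc]

theorem pv_replace_single (s : List Char) (o n : Char) :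
    PySem.Chars.replace s [o] [n] = s.map (pvSub o n) := by
  unfold PySem.Chars.replace
  rw [if_neg (by simp), pv_replace_go o n s.length s [] le_rfl]
  rfl

-- ---- the two tails agree ----

theorem pv_map_chain (sl : List Char) :
    ((((sl.map PySem.Chars.lowerChar).map (pvSub '/' ' ')).map (pvSub '-' ' ')).map
        (pvSub '_' ' ')) = sl.map pvF := by
  simp only [List.map_map]
  rfl

theorem pv_all_space_map (w : List Char) (hw : ∀ c ∈ w, PySem.Chars.isspace c = true) :
    (w.map pvF).all PySem.Chars.isspace = true := by
  rw [List.all_eq_true]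
  intro x hx
  obtain ⟨c, hc, rfl⟩ := List.mem_map.mp hx
  rw [pv_K1, hw c hc]
  rfl

theorem pv_split_strip (l : List Char) :
    PySem.Chars.split₀ ((PySem.Chars.strip l).map pvF) = PySem.Chars.split₀ (l.map pvF) := by
  unfold PySem.Chars.split₀ PySem.Chars.strip PySem.Chars.lstrip PySem.Chars.rstrip
  have h1 : l = l.takeWhile PySem.Chars.isspace ++ l.dropWhile PySem.Chars.isspace :=
    (List.takeWhile_append_dropWhile).symm
  set m := l.dropWhile PySem.Chars.isspace with hm
  have h2 : m = (m.reverse.dropWhile PySem.Chars.isspace).reverse ++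
      (m.reverse.takeWhile PySem.Chars.isspace).reverse := by
    conv_lhs => rw [← List.reverse_reverse m,
      ← List.takeWhile_append_dropWhile (p := PySem.Chars.isspace) (l := m.reverse)]
    rw [List.reverse_append]
  conv_rhs => rw [h1, List.map_append,
    pv_go_space_prefix _ (pv_all_space_map _ (fun c hc => List.mem_takeWhile_imp hc)),
    h2, List.map_append,
    pv_go_append_space _ (pv_all_space_map _
      (fun c hc => List.mem_takeWhile_imp (List.mem_reverse.mp hc)))]

theorem pv_suffix_step_eq (g sfx : String) (h : 0 < sfx.toList.length) :
    (if PySem.Str.endswith g sfx then PySem.Str.slice g none (some (-(PySem.Str.len sfx))) else g)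
      = pvRemoveSuffix g sfx := by
  unfold pvRemoveSuffix
  refine if_congr Iff.rfl ?_ rfl
  simp only [PySem.Str.slice, PySem.Str.len, PySem.Chars.slice_eq_listSlice]
  rw [PySem.List.slice_to_neg_natCast _ _ h]

theorem pv_fold_suffix_eq (g : String) :
    pvSuffixes.foldl (fun g suffix =>
        if PySem.Str.endswith g suffix then
          PySem.Str.slice g none (some (-(PySem.Str.len suffix))) else g) g
      = pvSuffixes.foldl pvRemoveSuffix g :=
  PySem.List.foldl_congr_mem pvSuffixes _ _ g
    (fun acc x hx => pv_suffix_step_eq acc x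
      ((by decide : ∀ x ∈ pvSuffixes, 0 < x.toList.length) x hx))

theorem pv_tail_eq (g : String) : pvTailA g = pvTailB g := by
  unfold pvTailA pvTailB
  rw [pv_fold_suffix_eq g]
  simp only [PySem.Str.join, PySem.Str.split₀, PySem.Str.replace, PySem.Str.lower,
    PySem.Str.strip, String.toList_ofList, List.map_map]
  refine congrArg String.ofList (congrArg (PySem.Chars.join " ".toList)
    (congrArg (List.map (String.toList ∘ String.ofList)) ?_))
  rw [show ("/" : String).toList = ['/'] by decide, show ("-" : String).toList = ['-'] by decide,
    show ("_" : String).toList = ['_'] by decide, show (" " : String).toList = [' '] by decide,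
    pv_replace_single, pv_replace_single, pv_replace_single]
  simp only [PySem.Chars.lower]
  rw [pv_map_chain, pv_split_strip]
  unfold PySem.Chars.split₀
  exact pv_go_words _ [] []

-- ===== VERDICT (by name: the statement is the Claim_ definition above) =====
theorem cleanup_genre_name_spec : Claim_equal_cleanup_genre_name := by
  intro genre _
  unfold Spec_cleanup_genre_name cleanup_genre_name cleanup_genre_name_alt
  rw [pv_fold_keywords, pv_tail_eq genre]
  simp only [pvKeywords, pvFirst, pv_match_ite, pv_if_or, List.any_cons, List.any_nil,
    Bool.or_false, Bool.or_assoc]
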